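-- pv_equiv track=rewrite | github.com/pypi-data/pypi-mirror-154 | packages/EcarX8155/EcarX8155-2.0.tar.gz/EcarX8155-2.0/EcarX8155/base_function.py | check_test_result
-- ===== SOURCE A (Python) =====
-- def check_test_result(result_list):
--     result_check_na = 0
--     result_check_ng = 0
--     result_check_ok = 0
--     if result_list == []:
--         return 'NG'
--     for i in result_list:
--         if i == 'NA':
--             result_check_na += 1
--         elif i == 'NG':
--             result_check_ng += 1
--         elif i == 'OK':
--             result_check_ok += 1
--     if result_check_na != 0:
--         return 'NA'
--     elif result_check_ng != 0:
--         return 'NG'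
--     else:
--         return 'OK'
-- ===== SOURCE B (Python) =====
-- def check_test_result(result_list):
--     if result_list == []:
--         return 'NG'
--     severity = max({'NA': 2, 'NG': 1}.get(i, 0) for i in result_list)
--     return ('OK', 'NG', 'NA')[severity]
-- ===== Notes on version B (the rewrite author's own statement) =====
-- stated objective: alternative
-- what changed: Replaced the three counters and the final branch chain by an order embedding: each element is mapped to a numeric severity (NA=2, NG=1, anything else 0), the verdict is the maximum severity decoded through a three-entry lookup table.
import Mathlib
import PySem

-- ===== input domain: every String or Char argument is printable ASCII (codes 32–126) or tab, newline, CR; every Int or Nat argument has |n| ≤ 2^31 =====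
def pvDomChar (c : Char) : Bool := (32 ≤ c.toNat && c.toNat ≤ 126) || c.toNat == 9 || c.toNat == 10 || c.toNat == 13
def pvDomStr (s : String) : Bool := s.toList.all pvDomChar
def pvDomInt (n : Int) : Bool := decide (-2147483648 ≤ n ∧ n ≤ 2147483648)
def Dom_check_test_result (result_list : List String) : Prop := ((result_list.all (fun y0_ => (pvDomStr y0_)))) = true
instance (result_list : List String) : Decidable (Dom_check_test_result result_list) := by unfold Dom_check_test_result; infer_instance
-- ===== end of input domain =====

-- B replaces A's three-counter tally and branch chain by an order embedding: map each element
-- to a numeric severity (NA=2, NG=1, else 0), take the max, decode via a lookup table; same cost.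


-- ===== PORT A =====
-- literal port: three counters updated by a left fold over the list, then the counter-based verdict
def check_test_result (result_list : List String) : String :=
  if result_list = [] then "NG"
  else
    let s := result_list.foldl
      (fun (s : Int × Int × Int) i =>
        if i = "NA" then (s.1 + 1, s.2.1, s.2.2)
        else if i = "NG" then (s.1, s.2.1 + 1, s.2.2)
        else if i = "OK" then (s.1, s.2.1, s.2.2 + 1)
        else s)
      (0, 0, 0)
    if s.1 ≠ 0 then "NA"
    else if s.2.1 ≠ 0 then "NG"
    else "OK"

-- ===== PORT B =====
-- {'NA': 2, 'NG': 1}.get(i, 0) — the dict literal from Source B, via PySem.Dict.getD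
def pvSeverity (i : String) : Nat :=
  PySem.Dict.getD (PySem.Dict.ofList [("NA", 2), ("NG", 1)]) i 0

-- literal port of Source B: empty guard; Python's max over the nonempty severity generator
-- (fold of max, exact here since every severity is a Nat ≥ 0); tuple indexing ('OK','NG','NA')[severity]
-- (getD is exact: severity ≤ 2 always, so the index is in range and Python never raises)
def check_test_result_alt (result_list : List String) : String :=
  if result_list = [] then "NG"
  else
    let severity := (result_list.map pvSeverity).foldl max 0
    ["OK", "NG", "NA"].getD severity "OK"

-- ===== PRECONDITION & SPEC =====
def Spec_check_test_result (result_list : List String) (out : String) : Prop := out = check_test_result_alt result_list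
instance (result_list : List String) (out : String) : Decidable (Spec_check_test_result result_list out) := by unfold Spec_check_test_result; infer_instance

-- ===== CLAIM (what is proved, stated in full; the proofs are below) =====
def Claim_equal_check_test_result : Prop := ∀ (result_list : List String), Dom_check_test_result result_list → Spec_check_test_result result_list (check_test_result result_list)

-- ===== LEMMAS AND PROOFS =====

-- A's fold: the counters starting from (a,b,c) are (a + #NA, b + #NG, c + #OK)
theorem pv_fold_count (l : List String) (a b c : Int) :
    l.foldl
      (fun (s : Int × Int × Int) i =>
        if i = "NA" then (s.1 + 1, s.2.1, s.2.2)
        else if i = "NG" then (s.1, s.2.1 + 1, s.2.2)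
        else if i = "OK" then (s.1, s.2.1, s.2.2 + 1)
        else s)
      (a, b, c)
    = (a + l.count "NA", b + l.count "NG", c + l.count "OK") := by
  induction l generalizing a b c with
  | nil => simp
  | cons x xs ih =>
    by_cases hna : x = "NA"
    · simp [hna, ih]; ring
    · by_cases hng : x = "NG"
      · simp [hng, ih]; ring
      · by_cases hok : x = "OK"
        · simp [hok, ih]; ring
        · simp [hna, hng, hok, ih]

-- fold of max with arbitrary initial value m = max m (fold from 0)
theorem pv_foldl_max_init (l : List Nat) (m : Nat) :
    l.foldl max m = max m (l.foldl max 0) := by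
  induction l generalizing m with
  | nil => simp
  | cons y ys ih =>
    simp only [List.foldl_cons]
    rw [ih (max m y), ih (max 0 y)]
    omega

-- pvSeverity as a closed if-chain
theorem pvSeverity_eq (x : String) :
    pvSeverity x = if x = "NA" then 2 else if x = "NG" then 1 else 0 := by
  have hd : PySem.Dict.ofList [("NA", 2), ("NG", 1)]
      = PySem.Dict.mk [("NA", (2 : Nat)), ("NG", 1)] := by decide
  unfold pvSeverity
  rw [hd, PySem.Dict.getD_eq_get?_getD]
  simp only [PySem.Dict.get?_mk_cons]
  by_cases hna : x = "NA"
  · simp [hna]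
  · by_cases hng : x = "NG"
    · simp [hng]
    · have h1 : ¬ ("NA" = x) := fun h => hna h.symm
      have h2 : ¬ ("NG" = x) := fun h => hng h.symm
      simp [h1, h2, hna, hng, PySem.Dict.get?]

-- B's fold: the maximum severity is 2 iff "NA" occurs, else 1 iff "NG" occurs, else 0
theorem pv_fold_max (l : List String) :
    (l.map pvSeverity).foldl max 0
      = (if "NA" ∈ l then 2 else if "NG" ∈ l then 1 else 0) := by
  induction l with
  | nil => simp
  | cons x xs ih =>
    simp only [List.map_cons, List.foldl_cons, List.mem_cons]
    rw [pv_foldl_max_init (xs.map pvSeverity) (max 0 (pvSeverity x)), ih, pvSeverity_eq]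
    by_cases hna : x = "NA"
    · simp [hna]; split_ifs <;> omega
    · by_cases hng : x = "NG"
      · simp [hng]
        split_ifs <;> omega
      · have h1 : ¬ ("NA" = x) := fun h => hna h.symm
        have h2 : ¬ ("NG" = x) := fun h => hng h.symm
        simp [hna, hng, h1, h2]

-- ===== VERDICT (by name: the statement is the Claim_ definition above) =====
theorem check_test_result_spec : Claim_equal_check_test_result := by
  intro l _
  unfold Spec_check_test_result check_test_result check_test_result_alt
  by_cases h : l = []
  · simp [h]
  · simp only [h, if_false]
    rw [pv_fold_count, pv_fold_max]
    simp only [Int.zero_add, ne_eq, Nat.cast_eq_zero, List.count_eq_zero]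
    by_cases hna : "NA" ∈ l
    · simp [hna]
    · by_cases hng : "NG" ∈ l
      · simp [hna, hng]
      · simp [hna, hng]
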